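-- pv_equiv track=rewrite | github.com/thartman83/archivist-descry | app/utils/desanity.py | _replace_url_characters
-- ===== SOURCE A (Python) =====
-- def _replace_url_characters(url_string):
--     """Replace illegal url characters with an undescore."""
--     retval = url_string
--     illegal_chars = [";", "/", "?", ":", "@", "&",
--                      "=", "+", "$", ",", "{", "}",
--                      ",", '"', "^", "[", "]", "`"]
--     for char in illegal_chars:
--         retval = retval.replace(char, '_')
--
--     return retval
-- ===== SOURCE B (Python) =====
-- def _replace_url_characters(url_string):
--     """Replace illegal url characters with an underscore."""
--     illegal = {";", "/", "?", ":", "@", "&", "=", "+", "$", ",",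
--                "{", "}", '"', "^", "[", "]", "`"}
--     return ''.join('_' if c in illegal else c for c in url_string)
-- ===== Notes on version B (the rewrite author's own statement) =====
-- stated objective: idiomatic
-- what changed: One single pass over the string with a set-membership test per character, joined at the end, instead of 18 sequential full-string .replace passes.
import Mathlib
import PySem

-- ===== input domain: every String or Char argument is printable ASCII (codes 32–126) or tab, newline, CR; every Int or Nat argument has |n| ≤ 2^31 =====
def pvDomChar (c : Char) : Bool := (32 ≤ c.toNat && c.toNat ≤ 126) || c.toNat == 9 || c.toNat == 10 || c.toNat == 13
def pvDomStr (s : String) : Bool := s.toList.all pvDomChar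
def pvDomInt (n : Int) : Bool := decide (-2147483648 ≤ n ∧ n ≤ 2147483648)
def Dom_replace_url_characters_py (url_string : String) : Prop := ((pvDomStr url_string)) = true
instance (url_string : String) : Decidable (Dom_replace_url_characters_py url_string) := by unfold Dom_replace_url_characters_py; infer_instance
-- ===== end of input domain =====

-- B replaces A's 18 sequential full-string replace passes by one single scan with a
-- set-membership test per character (idiomatic join over a comprehension); same return value.


-- ===== PORT A =====
-- A loops over the list of illegal characters, doing a full-string replace per character.
def replace_url_characters_py (url_string : String) : String :=
  let illegal_chars : List String :=
    [";", "/", "?", ":", "@", "&",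
     "=", "+", "$", ",", "{", "}",
     ",", "\"", "^", "[", "]", "`"]
  illegal_chars.foldl (fun retval ch => PySem.Str.replace retval ch "_") url_string

-- ===== PORT B =====
-- B does one scan: '_' if the character is in the illegal set, else the character, joined.
def pvIllegalSet : PySem.Set Char :=
  PySem.Set.ofList [';', '/', '?', ':', '@', '&', '=', '+', '$', ',',
                    '{', '}', '"', '^', '[', ']', '`']

def replace_url_characters_py_alt (url_string : String) : String :=
  String.ofList (url_string.toList.map (fun c => if pvIllegalSet.contains c then '_' else c))

-- ===== PRECONDITION & SPEC =====
def Spec_replace_url_characters_py (url_string : String) (out : String) : Prop := out = replace_url_characters_py_alt url_string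
instance (url_string : String) (out : String) : Decidable (Spec_replace_url_characters_py url_string out) := by unfold Spec_replace_url_characters_py; infer_instance

-- ===== CLAIM (what is proved, stated in full; the proofs are below) =====
def Claim_equal_replace_url_characters_py : Prop := ∀ (url_string : String), Dom_replace_url_characters_py url_string → Spec_replace_url_characters_py url_string (replace_url_characters_py url_string)

-- ===== LEMMAS AND PROOFS =====

-- replace.go with a single-character pattern maps that character to `n`, character by character.
theorem replace_go_single (o n : Char) :
    ∀ (l : List Char) (fuel : Nat) (acc : List Char), l.length ≤ fuel →
      PySem.Chars.replace.go [o] [n] fuel l acc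
        = acc.reverse ++ l.map (fun c => if c = o then n else c) := by
  intro l
  induction l with
  | nil =>
      intro fuel acc _
      cases fuel <;> simp [PySem.Chars.replace.go]
  | cons c t ih =>
      intro fuel acc h
      cases fuel with
      | zero => simp at h
      | succ f =>
        simp only [PySem.Chars.replace.go]
        by_cases hc : c = o
        · subst hc
          simp only [List.isPrefixOf, BEq.rfl, Bool.true_and, if_true]
          rw [show List.drop ([c].length : Nat) (c :: t) = t by simp]
          rw [ih f ([n].reverse ++ acc) (by simp at h; omega)]
          simp
        · have : ([o].isPrefixOf (c :: t)) = false := by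
            simp [List.isPrefixOf]
            intro h'; exact absurd h'.symm hc
          rw [this]
          simp only [Bool.false_eq_true, if_false]
          rw [ih f (c :: acc) (by simp at h; omega)]
          simp [hc]

-- Chars.replace with single-character old and new is a map.
theorem chars_replace_single (o n : Char) (l : List Char) :
    PySem.Chars.replace l [o] [n] = l.map (fun c => if c = o then n else c) := by
  unfold PySem.Chars.replace
  simp [replace_go_single o n l l.length [] (le_refl _)]

-- Folding single-character replacements over a list of characters equals the one-pass map.
theorem foldl_replace_eq_map (L : List Char) :
    ∀ (l : List Char),
      L.foldl (fun retval ch => PySem.Chars.replace retval [ch] ['_']) l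
        = l.map (fun c => if c ∈ L then '_' else c) := by
  induction L with
  | nil => intro l; simp
  | cons c0 rest ih =>
      intro l
      rw [List.foldl_cons, ih (PySem.Chars.replace l [c0] ['_']), chars_replace_single,
        List.map_map]
      apply List.map_congr_left
      intro c _
      by_cases hc : c = c0
      · subst hc; simp
      · simp [Function.comp, hc]

-- ===== VERDICT (by name: the statement is the Claim_ definition above) =====
theorem replace_url_characters_py_spec : Claim_equal_replace_url_characters_py := by
  intro s _
  unfold Spec_replace_url_characters_py replace_url_characters_py replace_url_characters_py_alt
  apply String.toList_inj.mp
  simp only [String.toList_ofList]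
  have h : ∀ (L : List String) (t : String),
      (L.foldl (fun retval ch => PySem.Str.replace retval ch "_") t).toList
        = L.foldl (fun retval ch => PySem.Chars.replace retval ch.toList ['_']) t.toList := by
    intro L
    induction L with
    | nil => intro t; simp
    | cons c rest ih =>
        intro t
        simp only [List.foldl_cons, ih, PySem.Str.toList_replace,
          show ("_" : String).toList = ['_'] from rfl]
  rw [h]
  have hexp : ([";", "/", "?", ":", "@", "&", "=", "+", "$", ",", "{", "}", ",", "\"", "^", "[", "]", "`"] : List String).foldl
        (fun retval ch => PySem.Chars.replace retval ch.toList ['_']) s.toList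
      = ([';', '/', '?', ':', '@', '&', '=', '+', '$', ',', '{', '}', ',', '"', '^', '[', ']', '`'] : List Char).foldl
        (fun retval ch => PySem.Chars.replace retval [ch] ['_']) s.toList := by
    simp only [List.foldl_cons, List.foldl_nil,
      show (";" : String).toList = [';'] from rfl,
      show ("/" : String).toList = ['/'] from rfl,
      show ("?" : String).toList = ['?'] from rfl,
      show (":" : String).toList = [':'] from rfl,
      show ("@" : String).toList = ['@'] from rfl,
      show ("&" : String).toList = ['&'] from rfl,
      show ("=" : String).toList = ['='] from rfl,
      show ("+" : String).toList = ['+'] from rfl,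
      show ("$" : String).toList = ['$'] from rfl,
      show ("," : String).toList = [','] from rfl,
      show ("{" : String).toList = ['{'] from rfl,
      show ("}" : String).toList = ['}'] from rfl,
      show ("\"" : String).toList = ['"'] from rfl,
      show ("^" : String).toList = ['^'] from rfl,
      show ("[" : String).toList = ['['] from rfl,
      show ("]" : String).toList = [']'] from rfl,
      show ("`" : String).toList = ['`'] from rfl]
  rw [hexp, foldl_replace_eq_map]
  apply List.map_congr_left
  intro c _
  have hiff : c ∈ pvIllegalSet ↔
      c ∈ ([';', '/', '?', ':', '@', '&', '=', '+', '$', ',', '{', '}', ',', '"', '^', '[', ']', '`'] : List Char) := by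
    unfold pvIllegalSet
    rw [PySem.Set.mem_ofList]
    constructor
    · intro hx; fin_cases hx <;> decide
    · intro hx; fin_cases hx <;> decide
  by_cases hm : c ∈ ([';', '/', '?', ':', '@', '&', '=', '+', '$', ',', '{', '}', ',', '"', '^', '[', ']', '`'] : List Char) <;>
    simp [hm, hiff]
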